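-- pv_equiv track=rewrite | github.com/exstyle/collatz-glued-grid-seam-automaton | code/glued_grid_checker.py | seam_kappas
-- ===== SOURCE A (Python) =====
-- def seam_kappas(k: int):
--     """
--     Décompose k = sum κi avec κi ∈ {1,2}.
--     Choix canonique: le plus de 2 possible, puis 1 si k impair.
--     """
--     if k <= 0:
--         return []
--     ks = []
--     while k >= 2:
--         ks.append(2)
--         k -= 2
--     if k == 1:
--         ks.append(1)
--     return ks
-- ===== SOURCE B (Python) =====
-- def seam_kappas(k: int):
--     if k <= 0:
--         return []
--     return [2] * (k // 2) + ([1] if k % 2 else [])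
-- ===== Notes on version B (the rewrite author's own statement) =====
-- stated objective: simpler
-- what changed: Replaces the decrementing while-loop that appends one element per iteration with a closed-form construction via list multiplication (floor-half copies of the even part, plus a trailing odd remainder).
import Mathlib
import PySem

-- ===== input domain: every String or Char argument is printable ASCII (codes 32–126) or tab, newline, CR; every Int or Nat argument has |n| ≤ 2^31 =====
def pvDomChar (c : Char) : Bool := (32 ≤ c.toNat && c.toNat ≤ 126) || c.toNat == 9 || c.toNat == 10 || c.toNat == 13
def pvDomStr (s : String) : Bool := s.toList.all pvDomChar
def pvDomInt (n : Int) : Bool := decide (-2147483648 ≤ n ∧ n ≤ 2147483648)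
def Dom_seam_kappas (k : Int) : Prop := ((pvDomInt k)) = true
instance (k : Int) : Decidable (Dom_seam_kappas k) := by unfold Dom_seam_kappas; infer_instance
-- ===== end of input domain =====

-- B replaces A's decrementing while-loop with a closed-form list construction (objective: simpler).

-- ===== PORT A =====
-- while k >= 2: ks.append(2); k -= 2   then   if k == 1: ks.append(1)
def seamLoop (k : Int) (ks : List Int) : List Int :=
  if k ≥ 2 then seamLoop (k - 2) (ks ++ [2])
  else if k = 1 then ks ++ [1] else ks
termination_by k.toNat
decreasing_by omega

def seam_kappas (k : Int) : List Int :=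
  if k ≤ 0 then [] else seamLoop k []

-- ===== PORT B =====
def seam_kappas_alt (k : Int) : List Int :=
  if k ≤ 0 then []
  else List.replicate (PySem.Int.floordiv k 2).toNat 2 ++
       (if PySem.Int.mod k 2 ≠ 0 then [1] else [])

-- ===== PRECONDITION & SPEC =====
def Spec_seam_kappas (k : Int) (out : List Int) : Prop := out = seam_kappas_alt k
instance (k : Int) (out : List Int) : Decidable (Spec_seam_kappas k out) := by unfold Spec_seam_kappas; infer_instance

-- ===== CLAIM (what is proved, stated in full; the proofs are below) =====
def Claim_equal_seam_kappas : Prop := ∀ (k : Int), Dom_seam_kappas k → Spec_seam_kappas k (seam_kappas k)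

-- ===== LEMMAS AND PROOFS =====
theorem seamLoop_closed (n : Nat) : ∀ (ks : List Int),
    seamLoop (n : Int) ks = ks ++ List.replicate (n / 2) 2 ++ (if n % 2 = 1 then [1] else []) := by
  induction n using Nat.strong_induction_on with
  | _ n ih =>
    intro ks
    rw [seamLoop]
    by_cases h : (n : Int) ≥ 2
    · have h2 : 2 ≤ n := by exact_mod_cast h
      simp only [h, if_pos]
      have : ((n : Int) - 2) = ((n - 2 : Nat) : Int) := by omega
      rw [this, ih (n - 2) (by omega)]
      have hd : n / 2 = (n - 2) / 2 + 1 := by omega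
      have hm : n % 2 = (n - 2) % 2 := by omega
      rw [hd, hm, List.replicate_succ]
      simp
    · have h1 : n ≤ 1 := by omega
      simp only [h, if_neg, not_false_iff]
      interval_cases n <;> simp

theorem seam_kappas_spec : Claim_equal_seam_kappas := by
  intro k _
  unfold Spec_seam_kappas seam_kappas seam_kappas_alt
  by_cases hk : k ≤ 0
  · simp [hk]
  · have h0 : 0 ≤ k := le_of_lt (lt_of_not_ge hk)
    have hkn : k = (k.toNat : Int) := by omega
    rw [if_neg hk, if_neg hk, hkn, seamLoop_closed k.toNat []]
    have hf : PySem.Int.floordiv ((k.toNat : Int)) 2 = ((k.toNat / 2 : Nat) : Int) := by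
      exact_mod_cast PySem.Int.floordiv_natCast k.toNat 2
    have hmm : PySem.Int.mod ((k.toNat : Int)) 2 = ((k.toNat % 2 : Nat) : Int) := by
      exact_mod_cast PySem.Int.mod_natCast k.toNat 2
    rw [hf, hmm]
    simp only [List.nil_append, Int.toNat_natCast]
    congr 1
    by_cases hm : k.toNat % 2 = 1
    · simp [hm]
    · have : k.toNat % 2 = 0 := by omega
      simp [this]
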